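-- pv_equiv track=rewrite | github.com/greenstar1151/Baekjoon | 2890_카약/2890_카약_250104.py | solution
-- ===== SOURCE A (Python) =====
-- def get_distance(lane: str):
--     lane = lane[1:-1][::-1]
--     for i, c in enumerate(lane):
--         if c != ".":
--             return i, c
--     return None, None
--
-- def solution(lanes: list[str]):
--     teams: list[tuple[int, str]] = []
--     for lane in lanes:
--         distance, team = get_distance(lane)
--         if team is None or distance is None:
--             continue
--         teams.append((distance, team))
--     ranks = [-1] * 9
--     rank, last_dist = 0, -1
--     for distance, team in sorted(teams):
--         if distance > last_dist:
--             last_dist = distance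
--             rank += 1
--         ranks[int(team) - 1] = rank
--     return ranks
-- ===== SOURCE B (Python) =====
-- def solution(lanes: list[str]):
--     pairs: list[tuple[int, str]] = []
--     for lane in lanes:
--         inner = lane[1:-1]
--         for j in range(len(inner) - 1, -1, -1):
--             if inner[j] != ".":
--                 pairs.append((len(inner) - 1 - j, inner[j]))
--                 break
--     dists = set(d for d, _ in pairs)
--     ranks = [-1] * 9
--     for d, t in sorted(pairs):
--         ranks[int(t) - 1] = 1 + sum(1 for x in dists if x < d)
--     return ranks
-- ===== Notes on version B (the rewrite author's own statement) =====
-- stated objective: alternative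
-- what changed: B scans each lane right-to-left instead of reversing it, and replaces A's stateful rank/last_dist dense-ranking scan with a per-team rank computed independently as 1 + the number of distinct strictly smaller distances, taken from a distance set built once.
import Mathlib
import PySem

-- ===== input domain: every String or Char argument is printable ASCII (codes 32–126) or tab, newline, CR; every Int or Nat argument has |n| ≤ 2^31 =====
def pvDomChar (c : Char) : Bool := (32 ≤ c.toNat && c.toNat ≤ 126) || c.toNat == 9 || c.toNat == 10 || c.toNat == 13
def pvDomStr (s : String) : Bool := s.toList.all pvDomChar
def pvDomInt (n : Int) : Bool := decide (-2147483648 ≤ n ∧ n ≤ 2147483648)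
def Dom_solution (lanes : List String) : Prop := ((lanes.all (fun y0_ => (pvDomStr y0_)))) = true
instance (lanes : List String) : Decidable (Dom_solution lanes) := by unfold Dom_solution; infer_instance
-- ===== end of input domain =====

-- B replaces A's stateful rank/last_dist scan by a per-team rank computed as
-- 1 + (number of distinct strictly smaller distances), with a right-to-left lane scan
-- instead of reverse-then-enumerate; same result, alternative decomposition.


-- ===== PORT A =====
-- Python's 1-character strings (the team marker) are represented as Char; this is exact
-- for the operations A performs on them ('!= "."', 'int(team)', tuple sort order on ASCII).
def pvFirstNonDot : List (Int × Char) → Option Int × Option Char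
  | [] => (none, none)
  | (i, c) :: rest => if c ≠ '.' then (some i, some c) else pvFirstNonDot rest

-- get_distance: lane[1:-1][::-1], then first (index, char) with char != "."
def getDistance (lane : String) : Option Int × Option Char :=
  let rl := (PySem.List.slice? (PySem.List.slice lane.toList (some 1) (some (-1))) none none (-1)).getD []
  pvFirstNonDot (PySem.List.enumerate rl 0)

def solution (lanes : List String) : List Int :=
  let teams : List (Int × Char) := lanes.foldl (fun acc lane =>
    match getDistance lane with
    | (some d, some t) => acc ++ [(d, t)]
    | _ => acc) []
  let fin := (PySem.List.sorted2 teams (fun p => p.1) (fun p => p.2)).foldl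
    (fun st p =>
      let rl : Int × Int := if st.2.2 < p.1 then (st.2.1 + 1, p.1) else (st.2.1, st.2.2)
      match PySem.Int.ofChars? [p.2] with
      | some n => (PySem.List.pySetD st.1 (n - 1) rl.1, rl.1, rl.2)
      | none => (st.1, rl.1, rl.2))   -- int(team) raises ValueError in Python: outside Pre_
    (List.replicate 9 (-1), 0, -1)
  fin.1

-- ===== PORT B =====
-- scan the inner lane right-to-left (j = len-1 .. 0), return (distance, marker) of the
-- first non-'.' cell; the 'none' arm of pyGet? is unreachable (j is a valid index).
def pvScanBack (inner : List Char) : List Int → Option (Int × Char)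
  | [] => none
  | j :: js =>
    match PySem.List.pyGet? inner j with
    | some c => if c ≠ '.' then some (PySem.List.len inner - 1 - j, c) else pvScanBack inner js
    | none => pvScanBack inner js

def solution_alt (lanes : List String) : List Int :=
  let pairs : List (Int × Char) := lanes.foldl (fun acc lane =>
    let inner := PySem.List.slice lane.toList (some 1) (some (-1))
    match pvScanBack inner (PySem.List.pyRange (PySem.List.len inner - 1) (-1) (-1)) with
    | some p => acc ++ [p]
    | none => acc) []
  let dists := PySem.Set.ofList (pairs.map (fun p => p.1))
  (PySem.List.sorted2 pairs (fun p => p.1) (fun p => p.2)).foldl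
    (fun ranks p =>
      match PySem.Int.ofChars? [p.2] with
      | some n => PySem.List.pySetD ranks (n - 1)
          (1 + ((dists.filter (fun x => x < p.1)).length : Int))
      | none => ranks)   -- int(t) raises ValueError in Python: outside Pre_
    (List.replicate 9 (-1))

-- ===== PRECONDITION & SPEC =====
-- pvMarker lane: the last non-'.' character strictly inside the lane (if any);
-- Python A calls int() on it, so A raises ValueError exactly when it is not a digit.
def pvMarker (lane : String) : Option Char :=
  ((lane.toList.drop 1).dropLast.reverse).find? (fun c => c ≠ '.')

def Pre_solution (lanes : List String) : Prop :=
  ∀ lane ∈ lanes, (pvMarker lane).all (fun c => c.isDigit) = true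
instance (lanes : List String) : Decidable (Pre_solution lanes) := by unfold Pre_solution; infer_instance

def pvWitness_solution : List String := ["|..1.|", "|2..|", "|....|"]

def Spec_solution (lanes : List String) (out : List Int) : Prop := out = solution_alt lanes
instance (lanes : List String) (out : List Int) : Decidable (Spec_solution lanes out) := by unfold Spec_solution; infer_instance

-- ===== CLAIM (what is proved, stated in full; the proofs are below) =====
def Claim_equal_solution : Prop := ∀ (lanes : List String), Dom_solution lanes → Pre_solution lanes → Spec_solution lanes (solution lanes)

-- ===== LEMMAS AND PROOFS =====

-- common reference form of the per-lane scan: first non-'.' char of rl, with a running counter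
def pvAux : List Char → Int → Option (Int × Char)
  | [], _ => none
  | c :: rest, i => if c ≠ '.' then some (i, c) else pvAux rest (i + 1)

lemma pvAux_ge : ∀ (rl : List Char) (s : Int) (i : Int) (c : Char),
    pvAux rl s = some (i, c) → s ≤ i := by
  intro rl
  induction rl with
  | nil => intro s i c h; simp [pvAux] at h
  | cons x rest ih =>
    intro s i c h
    by_cases hx : x ≠ '.'
    · simp [pvAux, hx] at h; omega
    · rw [pvAux, if_neg hx] at h
      have := ih (s + 1) i c h
      omega

lemma pvFirstNonDot_enum : ∀ (rl : List Char) (s : Int),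
    pvFirstNonDot (PySem.List.enumerate rl s) =
      (match pvAux rl s with
       | some (i, c) => (some i, some c)
       | none => (none, none)) := by
  intro rl
  induction rl with
  | nil => intro s; simp [PySem.List.enumerate_nil, pvFirstNonDot, pvAux]
  | cons x rest ih =>
    intro s
    by_cases hx : x ≠ '.'
    · simp [PySem.List.enumerate_cons, pvFirstNonDot, pvAux, hx]
    · simp [PySem.List.enumerate_cons, pvFirstNonDot, pvAux, hx, ih (s + 1)]

lemma pvPyRange_neg_one_cons (a : Int) (h : -1 < a) :
    PySem.List.pyRange a (-1) (-1) = a :: PySem.List.pyRange (a - 1) (-1) (-1) := by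
  unfold PySem.List.pyRange
  have h0 : ¬ ((-1 : Int) = 0) := by decide
  have h1 : ¬ ((0 : Int) < -1) := by decide
  simp only [if_neg h0, if_neg h1, if_pos h]
  by_cases h2 : (-1 : Int) < a - 1
  · simp only [if_pos h2]
    have e1 : (a - -1 + - -1 - 1) / -(-1) = a + 1 := by norm_num
    have e2 : (a - 1 - -1 + - -1 - 1) / -(-1) = a := by norm_num
    rw [e1, e2]
    have e3 : (a + 1).toNat = a.toNat + 1 := by omega
    rw [e3, List.range_succ_eq_map, List.map_cons, List.map_map]
    rw [show (a + -1 * ((0 : Nat) : Int)) = a by norm_num]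
    congr 1
    apply List.map_congr_left
    intro k _
    simp [Function.comp]
    ring
  · have ha : a = 0 := by omega
    subst ha
    simp

lemma pvScanBack_eq_aux : ∀ (l t : List Char),
    pvScanBack (l ++ t) (PySem.List.pyRange ((l.length : Int) - 1) (-1) (-1)) =
      pvAux l.reverse (t.length : Int) := by
  intro l
  induction l using List.reverseRecOn with
  | nil =>
    intro t
    simp [pvScanBack, pvAux, PySem.List.pyRange]
  | append_singleton l' c ih =>
    intro t
    have hlen : ((l' ++ [c]).length : Int) - 1 = (l'.length : Int) := by simp
    rw [hlen, pvPyRange_neg_one_cons _ (by omega)]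
    rw [pvScanBack]
    have hassoc : (l' ++ [c]) ++ t = l' ++ (c :: t) := by simp
    rw [hassoc, PySem.List.pyGet?_append_length]
    by_cases hc : c ≠ '.'
    · simp only [List.reverse_append, List.reverse_singleton, List.singleton_append,
        pvAux, if_pos hc]
      simp only [PySem.List.len_eq]
      norm_num
      omega
    · simp only [List.reverse_append, List.reverse_singleton, List.singleton_append,
        pvAux, if_neg hc]
      rw [ih (c :: t)]
      norm_num

lemma pvGetDistance_eq (lane : String) :
    getDistance lane =
      (match pvAux ((PySem.List.slice lane.toList (some 1) (some (-1))).reverse) 0 with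
       | some (i, c) => (some i, some c)
       | none => (none, none)) := by
  unfold getDistance
  rw [PySem.List.slice?_none_none_neg_one]
  simp only [Option.getD_some]
  exact pvFirstNonDot_enum _ 0

lemma pvScanBack_inner (inner : List Char) :
    pvScanBack inner (PySem.List.pyRange (PySem.List.len inner - 1) (-1) (-1)) =
      pvAux inner.reverse 0 := by
  have h := pvScanBack_eq_aux inner []
  simpa [PySem.List.len_eq] using h

-- the two per-lane parsers agree
lemma pvParse_agree (acc : List (Int × Char)) (lane : String) :
    (match getDistance lane with
     | (some d, some t) => acc ++ [(d, t)]
     | _ => acc) =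
    (let inner := PySem.List.slice lane.toList (some 1) (some (-1))
     match pvScanBack inner (PySem.List.pyRange (PySem.List.len inner - 1) (-1) (-1)) with
     | some p => acc ++ [p]
     | none => acc) := by
  show _ = (match pvScanBack (PySem.List.slice lane.toList (some 1) (some (-1)))
      (PySem.List.pyRange (PySem.List.len (PySem.List.slice lane.toList (some 1) (some (-1))) - 1) (-1) (-1)) with
    | some p => acc ++ [p]
    | none => acc)
  rw [pvGetDistance_eq, pvScanBack_inner]
  cases h : pvAux ((PySem.List.slice lane.toList (some 1) (some (-1))).reverse) 0 with
  | none => rfl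
  | some p => cases p; rfl

-- every parsed pair has a nonnegative distance
lemma pvParse_nonneg : ∀ (lanes : List String) (acc : List (Int × Char)) (p : Int × Char),
    p ∈ lanes.foldl (fun acc lane =>
      match getDistance lane with
      | (some d, some t) => acc ++ [(d, t)]
      | _ => acc) acc →
    p ∈ acc ∨ 0 ≤ p.1 := by
  intro lanes
  induction lanes with
  | nil => intro acc p hp; exact Or.inl hp
  | cons lane rest ih =>
    intro acc p hp
    rw [List.foldl_cons] at hp
    rcases ih _ p hp with h | h
    · rw [pvGetDistance_eq] at h
      cases haux : pvAux ((PySem.List.slice lane.toList (some 1) (some (-1))).reverse) 0 with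
      | none => rw [haux] at h; exact Or.inl h
      | some q =>
        obtain ⟨i, c⟩ := q
        rw [haux] at h
        simp only [List.mem_append, List.mem_singleton] at h
        rcases h with h | h
        · exact Or.inl h
        · subst h
          exact Or.inr (pvAux_ge _ 0 i c haux)
    · exact Or.inr h

-- insertion keeps a Pairwise invariant when 'before' decides R one way or the other
lemma pvPairwise_insertBy {α : Type} (before : α → α → Bool) (R : α → α → Prop)
    (htrans : ∀ a b c, R a b → R b c → R a c)
    (hyes : ∀ a b, before a b = true → R a b)
    (hno : ∀ a b, ¬ before a b = true → R b a) :
    ∀ (x : α) (ys : List α), ys.Pairwise R → (PySem.List.insertBy before x ys).Pairwise R := by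
  intro x ys
  induction ys with
  | nil => intro _; simp [PySem.List.insertBy]
  | cons y ys ih =>
    intro hpw
    rw [List.pairwise_cons] at hpw
    by_cases hb : before x y = true
    · rw [show PySem.List.insertBy before x (y :: ys) = x :: y :: ys from by
        simp [PySem.List.insertBy, hb]]
      refine List.Pairwise.cons ?_ (List.Pairwise.cons hpw.1 hpw.2)
      intro z hz
      rcases List.mem_cons.mp hz with h1 | hz'
      · subst h1; exact hyes x z hb
      · exact htrans x y z (hyes x y hb) (hpw.1 z hz')
    · rw [show PySem.List.insertBy before x (y :: ys) = y :: PySem.List.insertBy before x ys from by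
        simp [PySem.List.insertBy, hb]]
      refine List.Pairwise.cons ?_ (ih hpw.2)
      intro z hz
      rcases (PySem.List.mem_insertBy before x z ys).mp hz with h1 | hz'
      · subst h1; exact hno z y hb
      · exact hpw.1 z hz'

lemma pvPairwise_foldl {α : Type} (before : α → α → Bool) (R : α → α → Prop)
    (htrans : ∀ a b c, R a b → R b c → R a c)
    (hyes : ∀ a b, before a b = true → R a b)
    (hno : ∀ a b, ¬ before a b = true → R b a) :
    ∀ (xs acc : List α), acc.Pairwise R →
      (xs.foldl (fun acc x => PySem.List.insertBy before x acc) acc).Pairwise R := by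
  intro xs
  induction xs with
  | nil => intro acc h; exact h
  | cons x rest ih =>
    intro acc h
    exact ih _ (pvPairwise_insertBy before R htrans hyes hno x acc h)

lemma pvSorted2_pairwise (xs : List (Int × Char)) :
    (PySem.List.sorted2 xs (fun p => p.1) (fun p => p.2) false).Pairwise
      (fun p q => p.1 ≤ q.1) := by
  have hred : PySem.List.sorted2 xs (fun p => p.1) (fun p => p.2) false =
      xs.foldl (fun acc x => PySem.List.insertBy
        (fun a b : Int × Char =>
          decide (a.1 < b.1) || (!decide (b.1 < a.1) && decide (a.2 < b.2))) x acc) [] := rfl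
  rw [hred]
  refine pvPairwise_foldl _ (fun p q : Int × Char => p.1 ≤ q.1) ?_ ?_ ?_ xs [] List.Pairwise.nil
  · intro a b c h1 h2; exact le_trans h1 h2
  · intro a b h
    simp only [Bool.or_eq_true, Bool.and_eq_true, Bool.not_eq_true', decide_eq_true_eq,
      decide_eq_false_iff_not] at h
    rcases h with h | ⟨h, _⟩
    · exact le_of_lt h
    · exact not_lt.mp h
  · intro a b h
    simp only [Bool.or_eq_true, Bool.and_eq_true, Bool.not_eq_true', decide_eq_true_eq,
      decide_eq_false_iff_not, not_or] at h
    exact not_lt.mp h.1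

lemma pvFilter_le_succ (D : List Int) (hD : D.Nodup) (d : Int) (hd : d ∈ D) :
    (D.filter (fun x => x ≤ d)).length = (D.filter (fun x => x < d)).length + 1 := by
  induction D with
  | nil => cases hd
  | cons a T ih =>
    rw [List.nodup_cons] at hD
    by_cases had : a = d
    · subst had
      have hcg : T.filter (fun x => decide (x ≤ a)) = T.filter (fun x => decide (x < a)) := by
        apply List.filter_congr
        intro x hx
        have hxa : x ≠ a := fun h => hD.1 (h ▸ hx)
        simp only [decide_eq_decide]
        omega
      simp only [List.filter_cons]
      simp only [decide_eq_true_eq]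
      rw [if_pos le_rfl, if_neg (lt_irrefl a)]
      simp [hcg]
    · have hdT : d ∈ T := by
        rcases List.mem_cons.mp hd with h | h
        · exact absurd h.symm had
        · exact h
      have hstep := ih hD.2 hdT
      simp only [List.filter_cons, decide_eq_true_eq]
      by_cases hle : a ≤ d
      · rw [if_pos hle, if_pos (lt_of_le_of_ne hle had)]
        simp [hstep]
      · rw [if_neg hle, if_neg (fun h => hle (le_of_lt h))]
        exact hstep

lemma pvFilter_gap (D : List Int) (last d : Int) (hld : last < d)
    (h : ∀ x ∈ D, x ≤ last ∨ d ≤ x) :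
    D.filter (fun x => x < d) = D.filter (fun x => x ≤ last) := by
  apply List.filter_congr
  intro x hx
  have := h x hx
  simp only [decide_eq_decide]
  omega

-- main loop invariant: A's running rank equals 1 + number of distinct smaller distances
lemma pvMain (D : List Int) (hD : D.Nodup) :
    ∀ (L : List (Int × Char)) (ranks : List Int) (rank last : Int),
    L.Pairwise (fun p q => p.1 ≤ q.1) →
    (∀ p ∈ L, last ≤ p.1) →
    (∀ p ∈ L, p.1 ∈ D) →
    (∀ x ∈ D, x ≤ last ∨ ∃ p ∈ L, p.1 = x) →
    rank = ((D.filter (fun x => x ≤ last)).length : Int) →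
    (L.foldl (fun st p =>
        let rl : Int × Int := if st.2.2 < p.1 then (st.2.1 + 1, p.1) else (st.2.1, st.2.2)
        match PySem.Int.ofChars? [p.2] with
        | some n => (PySem.List.pySetD st.1 (n - 1) rl.1, rl.1, rl.2)
        | none => (st.1, rl.1, rl.2)) (ranks, rank, last)).1 =
      L.foldl (fun ranks p =>
        match PySem.Int.ofChars? [p.2] with
        | some n => PySem.List.pySetD ranks (n - 1)
            (1 + ((D.filter (fun x => x < p.1)).length : Int))
        | none => ranks) ranks := by
  intro L
  induction L with
  | nil => intro ranks rank last _ _ _ _ _; rfl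
  | cons p rest ih =>
    intro ranks rank last hpw hge hmem hgap hrank
    rw [List.pairwise_cons] at hpw
    have hd_ge : last ≤ p.1 := hge p (List.mem_cons_self ..)
    have hdD : p.1 ∈ D := hmem p (List.mem_cons_self ..)
    have hmem' : ∀ q ∈ rest, q.1 ∈ D := fun q hq => hmem q (List.mem_cons_of_mem _ hq)
    have hgap' : ∀ x ∈ D, x ≤ p.1 ∨ ∃ q ∈ rest, q.1 = x := by
      intro x hx
      rcases hgap x hx with h | ⟨q, hq, hqx⟩
      · exact Or.inl (le_trans h hd_ge)
      · rcases List.mem_cons.mp hq with h1 | hq'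
        · exact Or.inl (le_of_eq (h1 ▸ hqx).symm)
        · exact Or.inr ⟨q, hq', hqx⟩
    simp only [List.foldl_cons]
    by_cases hgt : last < p.1
    · have hgapd : ∀ x ∈ D, x ≤ last ∨ p.1 ≤ x := by
        intro x hx
        rcases hgap x hx with h | ⟨q, hq, hqx⟩
        · exact Or.inl h
        · rcases List.mem_cons.mp hq with h1 | hq'
          · exact Or.inr (le_of_eq (h1 ▸ hqx))
          · exact Or.inr (hqx ▸ hpw.1 q hq')
      have hgapL := pvFilter_gap D last p.1 hgt hgapd
      have hsucc := pvFilter_le_succ D hD p.1 hdD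
      have hcnt : rank + 1 = ((D.filter (fun x => x ≤ p.1)).length : Int) := by
        rw [hsucc, hgapL]; push_cast; omega
      have hBval : 1 + ((D.filter (fun x => x < p.1)).length : Int) = rank + 1 := by
        rw [hgapL]; omega
      cases hn : PySem.Int.ofChars? [p.2] with
      | some n =>
        simp only [if_pos hgt, hBval]
        exact ih _ (rank + 1) p.1 hpw.2 hpw.1 hmem' hgap' hcnt
      | none =>
        simp only [if_pos hgt]
        exact ih _ (rank + 1) p.1 hpw.2 hpw.1 hmem' hgap' hcnt
    · have hdeq : p.1 = last := by omega
      have hge' : ∀ q ∈ rest, p.1 ≤ q.1 := hpw.1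
      have hcnt : rank = ((D.filter (fun x => x ≤ p.1)).length : Int) := by
        rw [hdeq]; exact hrank
      have hBval : 1 + ((D.filter (fun x => x < p.1)).length : Int) = rank := by
        have hsucc := pvFilter_le_succ D hD p.1 hdD
        rw [hcnt]; omega
      cases hn : PySem.Int.ofChars? [p.2] with
      | some n =>
        simp only [if_neg hgt, hBval]
        exact ih _ rank last hpw.2 (fun q hq => hdeq ▸ hge' q hq) hmem'
          (fun x hx => (hdeq ▸ hgap' x hx : x ≤ last ∨ ∃ q ∈ rest, q.1 = x)) hrank
      | none =>
        simp only [if_neg hgt]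
        exact ih _ rank last hpw.2 (fun q hq => hdeq ▸ hge' q hq) hmem'
          (fun x hx => (hdeq ▸ hgap' x hx : x ≤ last ∨ ∃ q ∈ rest, q.1 = x)) hrank

-- ===== VERDICT (by name: the statement is the Claim_ definition above) =====
theorem solution_spec : Claim_equal_solution := by
  intro lanes _ _
  show solution lanes = solution_alt lanes
  unfold solution solution_alt
  have hfun : (fun (acc : List (Int × Char)) lane =>
      match getDistance lane with
      | (some d, some t) => acc ++ [(d, t)]
      | _ => acc) =
      (fun (acc : List (Int × Char)) lane =>
        let inner := PySem.List.slice lane.toList (some 1) (some (-1))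
        match pvScanBack inner (PySem.List.pyRange (PySem.List.len inner - 1) (-1) (-1)) with
        | some p => acc ++ [p]
        | none => acc) := by
    funext acc lane
    exact pvParse_agree acc lane
  rw [hfun]
  set P : List (Int × Char) := lanes.foldl (fun acc lane =>
    let inner := PySem.List.slice lane.toList (some 1) (some (-1))
    match pvScanBack inner (PySem.List.pyRange (PySem.List.len inner - 1) (-1) (-1)) with
    | some p => acc ++ [p]
    | none => acc) [] with hP
  have hnonneg : ∀ p ∈ P, 0 ≤ p.1 := by
    intro p hp
    have hmemA := pvParse_nonneg lanes [] p
    rw [hfun] at hmemA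
    rcases hmemA (hP ▸ hp) with h | h
    · cases h
    · exact h
  have hDnodup := PySem.Set.nodup_ofList (P.map (fun p => p.1))
  have hperm := PySem.List.sorted2_perm P (fun p => p.1) (fun p => p.2) false
  have hDnn : ∀ x ∈ PySem.Set.ofList (P.map (fun p => p.1)), 0 ≤ x := by
    intro x hx
    rw [PySem.Set.mem_ofList] at hx
    obtain ⟨p, hpP, hpx⟩ := List.mem_map.mp hx
    exact hpx ▸ hnonneg p hpP
  refine pvMain (PySem.Set.ofList (P.map (fun p => p.1))) hDnodup
    (PySem.List.sorted2 P (fun p => p.1) (fun p => p.2) false)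
    (List.replicate 9 (-1)) 0 (-1) (pvSorted2_pairwise P) ?_ ?_ ?_ ?_
  · intro p hp
    have := hnonneg p (hperm.mem_iff.mp hp)
    omega
  · intro p hp
    rw [PySem.Set.mem_ofList]
    exact List.mem_map_of_mem (hperm.mem_iff.mp hp)
  · intro x hx
    refine Or.inr ?_
    rw [PySem.Set.mem_ofList] at hx
    obtain ⟨p, hpP, hpx⟩ := List.mem_map.mp hx
    exact ⟨p, hperm.mem_iff.mpr hpP, hpx⟩
  · have hnil : (PySem.Set.ofList (P.map (fun p => p.1))).filter (fun x => decide (x ≤ -1)) = [] := by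
      apply List.filter_eq_nil_iff.mpr
      intro x hx
      have := hDnn x hx
      simp
      omega
    rw [hnil]
    rfl
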